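-- pv_equiv track=rewrite | github.com/iocanel/advent-of-code | 2024/day09/b.py | next_gap
-- ===== SOURCE A (Python) =====
-- def next_gap(blocks, size):
--     for i in range(len(blocks)):
--         if blocks[i] == '.':
--             j = i
--             while j < len(blocks) and blocks[j] == '.':
--                 j += 1
--             if j - i >= size:
--                 return i, j
--     return -1, -1
-- ===== SOURCE B (Python) =====
-- def next_gap(blocks, size):
--     start = None
--     for idx, b in enumerate(blocks):
--         if b == '.':
--             if start is None:
--                 start = idx
--         elif start is not None:
--             if idx - start >= size:
--                 return start, idx
--             start = None
--     if start is not None and len(blocks) - start >= size: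
--         return start, len(blocks)
--     return -1, -1
-- ===== Notes on version B (the rewrite author's own statement) =====
-- stated objective: alternative
-- what changed: Single left-to-right pass that remembers the start of the current dot-run and checks its length once at the run's end, instead of rescanning the rest of the run from every dot index.
import Mathlib
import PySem

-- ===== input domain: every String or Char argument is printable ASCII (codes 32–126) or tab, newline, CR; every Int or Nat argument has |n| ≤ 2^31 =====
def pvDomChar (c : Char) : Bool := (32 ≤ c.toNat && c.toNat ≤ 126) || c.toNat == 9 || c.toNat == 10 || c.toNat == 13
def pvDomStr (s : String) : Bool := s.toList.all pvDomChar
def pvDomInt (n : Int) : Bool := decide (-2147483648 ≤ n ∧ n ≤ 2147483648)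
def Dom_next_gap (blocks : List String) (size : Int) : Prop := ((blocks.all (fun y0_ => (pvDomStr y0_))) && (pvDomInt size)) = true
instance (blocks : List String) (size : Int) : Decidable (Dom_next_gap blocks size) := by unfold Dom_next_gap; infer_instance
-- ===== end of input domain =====

-- B replaces A's rescan-from-every-dot search by a single pass remembering the current run's start (objective: alternative).

-- ===== PORT A =====
-- inner while loop: j += 1 while j < len(blocks) and blocks[j] == '.'
def scanJ (blocks : List String) (j : Nat) : Nat :=
  if _h : j < blocks.length ∧ blocks.getD j "" = "." then scanJ blocks (j + 1) else j
termination_by blocks.length - j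
decreasing_by omega

-- outer for loop over i in range(len(blocks))
def nextGapLoopA (blocks : List String) (size : Int) (i : Nat) : List Int :=
  if _h : i < blocks.length then
    if blocks.getD i "" = "." then
      let j := scanJ blocks i
      if (j : Int) - (i : Int) ≥ size then [(i : Int), (j : Int)]
      else nextGapLoopA blocks size (i + 1)
    else nextGapLoopA blocks size (i + 1)
  else [-1, -1]
termination_by blocks.length - i
decreasing_by all_goals omega

def next_gap (blocks : List String) (size : Int) : List Int :=
  nextGapLoopA blocks size 0

-- ===== PORT B =====
-- one pass: `start` is the index of the current run of '.' (none if not in a run)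
def nextGapLoopB (size : Int) : List String → Nat → Option Nat → List Int
  | [], idx, some s => if (idx : Int) - (s : Int) ≥ size then [(s : Int), (idx : Int)] else [-1, -1]
  | [], _, none => [-1, -1]
  | b :: rest, idx, start =>
    if b = "." then
      match start with
      | some s => nextGapLoopB size rest (idx + 1) (some s)
      | none => nextGapLoopB size rest (idx + 1) (some idx)
    else
      match start with
      | some s =>
        if (idx : Int) - (s : Int) ≥ size then [(s : Int), (idx : Int)]
        else nextGapLoopB size rest (idx + 1) none
      | none => nextGapLoopB size rest (idx + 1) none

def next_gap_alt (blocks : List String) (size : Int) : List Int :=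
  nextGapLoopB size blocks 0 none

-- ===== PRECONDITION & SPEC =====
def Spec_next_gap (blocks : List String) (size : Int) (out : List Int) : Prop := out = next_gap_alt blocks size
instance (blocks : List String) (size : Int) (out : List Int) : Decidable (Spec_next_gap blocks size out) := by unfold Spec_next_gap; infer_instance

-- ===== CLAIM (what is proved, stated in full; the proofs are below) =====
def Claim_equal_next_gap : Prop := ∀ (blocks : List String) (size : Int), Dom_next_gap blocks size → Spec_next_gap blocks size (next_gap blocks size)

-- ===== LEMMAS AND PROOFS =====

theorem scanJ_ge (blocks : List String) (j : Nat) : j ≤ scanJ blocks j := by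
  fun_induction scanJ with
  | case1 j h ih => omega
  | case2 j h => omega

theorem scanJ_le (blocks : List String) (j : Nat) (h : j ≤ blocks.length) :
    scanJ blocks j ≤ blocks.length := by
  fun_induction scanJ with
  | case1 j h ih => exact ih (by omega)
  | case2 j h2 => exact h

theorem scanJ_dots (blocks : List String) (j : Nat) :
    ∀ m, j ≤ m → m < scanJ blocks j → blocks.getD m "" = "." := by
  fun_induction scanJ with
  | case1 j h ih =>
    intro m hm hm2
    rcases Nat.eq_or_lt_of_le hm with rfl | hlt
    · exact h.2
    · exact ih m hlt hm2
  | case2 j h =>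
    intro m hm hm2
    omega

theorem scanJ_bound (blocks : List String) (j : Nat) :
    scanJ blocks j = blocks.length ∨ ¬ (scanJ blocks j < blocks.length ∧ blocks.getD (scanJ blocks j) "" = ".") := by
  fun_induction scanJ with
  | case1 j h ih => exact ih
  | case2 j h => right; exact h

-- scanJ computed at j given run facts
theorem scanJ_eq (blocks : List String) (j : Nat) (hlen : j ≤ blocks.length)
    (hbound : j = blocks.length ∨ blocks.getD j "" ≠ ".") :
    ∀ k, k ≤ j → (∀ m, k ≤ m → m < j → blocks.getD m "" = ".") → scanJ blocks k = j := by
  intro k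
  induction hn : j - k generalizing k with
  | zero =>
    intro hk hd
    have : k = j := by omega
    subst this
    rw [scanJ]
    refine dif_neg ?_
    rcases hbound with h | h
    · omega
    · intro h2; exact h h2.2
  | succ n ih =>
    intro hk hd
    have hkj : k < j := by omega
    rw [scanJ, dif_pos (⟨by omega, hd k le_rfl hkj⟩ : k < blocks.length ∧ blocks.getD k "" = ".")]
    exact ih (k + 1) (by omega) (by omega) (fun m h1 h2 => hd m (by omega) h2)

theorem drop_cons (blocks : List String) (k : Nat) (h : k < blocks.length) :
    blocks.drop k = blocks.getD k "" :: blocks.drop (k + 1) := by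
  rw [List.getD_eq_getElem _ _ h]
  exact List.drop_eq_getElem_cons h

-- A skips through a too-short run one index at a time
theorem loopA_run (blocks : List String) (size : Int) (j : Nat) (hlen : j ≤ blocks.length)
    (hbound : j = blocks.length ∨ blocks.getD j "" ≠ ".")
    (i : Nat) (hshort : (j : Int) - (i : Int) < size) :
    ∀ k, i ≤ k → k ≤ j → (∀ m, k ≤ m → m < j → blocks.getD m "" = ".") →
      nextGapLoopA blocks size k = nextGapLoopA blocks size j := by
  intro k
  induction hn : j - k generalizing k with
  | zero =>
    intro h1 h2 _
    have : k = j := by omega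
    rw [this]
  | succ n ih =>
    intro h1 h2 hd
    have hkj : k < j := by omega
    rw [nextGapLoopA, dif_pos (by omega), if_pos (hd k le_rfl hkj),
      scanJ_eq blocks j hlen hbound k (by omega) hd, if_neg (by omega)]
    exact ih (k + 1) (by omega) (by omega) (by omega) (fun m h1 h2 => hd m (by omega) h2)

-- B skips through a run (start already recorded) to its end j
theorem loopB_run (blocks : List String) (size : Int) (j : Nat) (s : Nat) :
    ∀ k, k ≤ j → j ≤ blocks.length → (∀ m, k ≤ m → m < j → blocks.getD m "" = ".") →
      nextGapLoopB size (blocks.drop k) k (some s) = nextGapLoopB size (blocks.drop j) j (some s) := by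
  intro k
  induction hn : j - k generalizing k with
  | zero =>
    intro h1 _ _
    have : k = j := by omega
    rw [this]
  | succ n ih =>
    intro h1 hlen hd
    have hkj : k < j := by omega
    rw [drop_cons blocks k (by omega), nextGapLoopB, if_pos (hd k le_rfl hkj)]
    exact ih (k + 1) (by omega) (by omega) hlen (fun m h1 h2 => hd m (by omega) h2)

-- at a run boundary j, B with recorded start s decides once
theorem loopB_boundary (blocks : List String) (size : Int) (j : Nat) (s : Nat)
    (hlen : j ≤ blocks.length) (hbound : j = blocks.length ∨ blocks.getD j "" ≠ ".") :
    nextGapLoopB size (blocks.drop j) j (some s) =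
      if (j : Int) - (s : Int) ≥ size then [(s : Int), (j : Int)]
      else nextGapLoopB size (blocks.drop j) j none := by
  rcases Nat.eq_or_lt_of_le hlen with rfl | hlt
  · rw [List.drop_length]
    rfl
  · have hb : blocks.getD j "" ≠ "." := by
      rcases hbound with h | h
      · omega
      · exact h
    rw [drop_cons blocks j hlt, nextGapLoopB, if_neg hb, nextGapLoopB, if_neg hb]

theorem main_loop (blocks : List String) (size : Int) :
    ∀ n i, blocks.length - i ≤ n → i ≤ blocks.length →
      nextGapLoopA blocks size i = nextGapLoopB size (blocks.drop i) i none := by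
  intro n
  induction n with
  | zero =>
    intro i h1 h2
    have : i = blocks.length := by omega
    subst this
    rw [List.drop_length, nextGapLoopA, dif_neg (by omega)]
    rfl
  | succ n ih =>
    intro i h1 h2
    rcases Nat.eq_or_lt_of_le h2 with rfl | hlt
    · rw [List.drop_length, nextGapLoopA, dif_neg (by omega)]
      rfl
    · by_cases hdot : blocks.getD i "" = "."
      · -- run starting at i
        set j := scanJ blocks i with hj
        have hji : i + 1 ≤ j := by
          have h1 := scanJ_ge blocks (i + 1)
          have h2 : scanJ blocks i = scanJ blocks (i + 1) := by
            rw [scanJ]; exact dif_pos ⟨hlt, hdot⟩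
          omega
        have hjlen : j ≤ blocks.length := scanJ_le blocks i (by omega)
        have hdots : ∀ m, i ≤ m → m < j → blocks.getD m "" = "." := scanJ_dots blocks i
        have hboundj : j = blocks.length ∨ blocks.getD j "" ≠ "." := by
          rcases scanJ_bound blocks i with h | h
          · left; exact h
          · by_cases hjl : j = blocks.length
            · left; exact hjl
            · right; intro hc; exact h ⟨by omega, hc⟩
        -- B side: consume blocks[i] = ".", record start i, skip run to j
        have hBside : nextGapLoopB size (blocks.drop i) i none =
            nextGapLoopB size (blocks.drop j) j (some i) := by
          rw [drop_cons blocks i hlt, nextGapLoopB, if_pos hdot]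
          exact loopB_run blocks size j i (i + 1) hji hjlen
            (fun m h1 h2 => hdots m (by omega) h2)
        rw [nextGapLoopA, dif_pos hlt, if_pos hdot, hBside,
          loopB_boundary blocks size j i hjlen hboundj]
        by_cases hsz : (j : Int) - (i : Int) ≥ size
        · simp only [← hj]
          simp [hsz]
        · rw [if_neg hsz,
            loopA_run blocks size j hjlen hboundj i (by omega) (i + 1) (by omega) hji
              (fun m h1 h2 => hdots m (by omega) h2)]
          rw [if_neg hsz]
          exact ih j (by omega) hjlen
      · rw [nextGapLoopA, dif_pos hlt, if_neg hdot, drop_cons blocks i hlt, nextGapLoopB,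
          if_neg hdot]
        exact ih (i + 1) (by omega) (by omega)

-- ===== VERDICT (by name: the statement is the Claim_ definition above) =====
theorem next_gap_spec : Claim_equal_next_gap := by
  intro blocks size _
  unfold Spec_next_gap next_gap next_gap_alt
  simpa using main_loop blocks size blocks.length 0 (by omega) (by omega)
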